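-- pv_equiv track=rewrite | github.com/Volcann/M2MasterBot | src/core/utils/utils.py | _get_remove_values
-- ===== SOURCE A (Python) =====
-- def _get_remove_values(max_value):
--     if max_value < 1024:
--         return 0
--
--     removed = 2
--
--     while max_value > 1024:
--         max_value //= 2
--         removed *= 2
--
--     if removed > 8:
--         removed //= 2
--         if removed > 16:
--             removed //= 2
--             if removed > 32:
--                 removed //= 2
--                 if removed > 64:
--                     removed //= 2
--
--     return removed
-- ===== SOURCE B (Python) =====
-- def _get_remove_values(max_value):
--     if max_value < 1024:
--         return 0
--     # The value doubles once per halving needed to bring max_value down to 1024: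
--     # the least n with max_value // 2**n <= 1024 is (max_value // 1025).bit_length().
--     removed = 2 << (max_value // 1025).bit_length()
--     # Damp the growth: above each threshold, give back one doubling.
--     for limit in (8, 16, 32, 64):
--         if removed > limit:
--             removed //= 2
--     return removed
-- ===== Notes on version B (the rewrite author's own statement) =====
-- stated objective: simpler
-- what changed: Replaces the data-dependent halving loop with a closed-form bit_length computation of the doubling count, and the nested clamping ifs with a single pass over the four thresholds.
import Mathlib
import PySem

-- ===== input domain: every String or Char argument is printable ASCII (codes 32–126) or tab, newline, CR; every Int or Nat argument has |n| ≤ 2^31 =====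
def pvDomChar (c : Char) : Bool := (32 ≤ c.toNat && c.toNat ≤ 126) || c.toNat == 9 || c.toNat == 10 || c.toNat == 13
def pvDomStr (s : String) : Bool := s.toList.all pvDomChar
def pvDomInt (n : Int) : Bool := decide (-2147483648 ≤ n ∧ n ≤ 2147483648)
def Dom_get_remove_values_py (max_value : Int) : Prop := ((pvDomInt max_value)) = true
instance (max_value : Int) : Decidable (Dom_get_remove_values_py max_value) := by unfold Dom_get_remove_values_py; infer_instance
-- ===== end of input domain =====

-- B replaces A's data-dependent halving loop by a closed-form bit_length count and the
-- nested clamping ifs by one pass over the four thresholds (objective: simpler).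

-- ===== PORT A =====
-- the while loop: (max_value, removed) evolve until max_value <= 1024
def pyHalveLoop (max_value removed : Int) : Int × Int :=
  if 1024 < max_value then
    pyHalveLoop (PySem.Int.floordiv max_value 2) (removed * 2)
  else (max_value, removed)
termination_by max_value.toNat
decreasing_by
  rw [PySem.Int.floordiv_eq_ediv_of_pos (by omega : (0:Int) < 2)]
  omega

-- the nested clamping ifs at the end of A
def pyCascade (removed : Int) : Int :=
  if 8 < removed then
    let r1 := PySem.Int.floordiv removed 2
    if 16 < r1 then
      let r2 := PySem.Int.floordiv r1 2
      if 32 < r2 then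
        let r3 := PySem.Int.floordiv r2 2
        if 64 < r3 then PySem.Int.floordiv r3 2 else r3
      else r2
    else r1
  else removed

def get_remove_values_py (max_value : Int) : Int :=
  if max_value < 1024 then 0
  else pyCascade (pyHalveLoop max_value 2).2

-- ===== PORT B =====
def get_remove_values_py_alt (max_value : Int) : Int :=
  if max_value < 1024 then 0
  else
    -- removed = 2 << (max_value // 1025).bit_length()
    let removed : Int := 2 * 2 ^ PySem.Int.bitLength (PySem.Int.floordiv max_value 1025)
    -- for limit in (8, 16, 32, 64): if removed > limit: removed //= 2
    List.foldl (fun r limit => if limit < r then PySem.Int.floordiv r 2 else r)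
      removed [(8:Int), 16, 32, 64]

-- ===== PRECONDITION & SPEC =====
def Spec_get_remove_values_py (max_value : Int) (out : Int) : Prop := out = get_remove_values_py_alt max_value
instance (max_value : Int) (out : Int) : Decidable (Spec_get_remove_values_py max_value out) := by unfold Spec_get_remove_values_py; infer_instance

-- ===== CLAIM (what is proved, stated in full; the proofs are below) =====
def Claim_equal_get_remove_values_py : Prop := ∀ (max_value : Int), Dom_get_remove_values_py max_value → Spec_get_remove_values_py max_value (get_remove_values_py max_value)

-- ===== LEMMAS AND PROOFS =====

-- bitLength is bounded by any b with n < 2^b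
theorem pv_bitLength_le (b : Nat) : ∀ (n : Int), 0 ≤ n → n < 2 ^ b → PySem.Int.bitLength n ≤ b := by
  induction b with
  | zero =>
    intro n h0 hlt
    have : n = 0 := by omega
    simp [this]
  | succ b ih =>
    intro n h0 hlt
    rcases eq_or_lt_of_le h0 with h | h
    · simp [← h]
    · rw [PySem.Int.bitLength_of_pos h]
      have hd : PySem.Int.floordiv n 2 = n / 2 :=
        PySem.Int.floordiv_eq_ediv_of_pos (by omega)
      have h2 : (2:Int) ^ (b+1) = 2 ^ b * 2 := by ring
      have := ih (PySem.Int.floordiv n 2) (by rw [hd]; omega)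
        (by rw [hd]; rw [h2] at hlt; omega)
      omega

-- the loop multiplies removed by 2^(bitLength (m // 1025))
theorem pv_loop_snd (k : Nat) : ∀ (m r : Int), 0 ≤ m → m.toNat ≤ k →
    (pyHalveLoop m r).2 = r * 2 ^ PySem.Int.bitLength (PySem.Int.floordiv m 1025) := by
  induction k with
  | zero =>
    intro m r h0 hk
    have hm : m = 0 := by omega
    rw [pyHalveLoop]
    simp [hm, PySem.Int.floordiv]
  | succ k ih =>
    intro m r h0 hk
    rw [pyHalveLoop]
    by_cases h : 1024 < m
    · rw [if_pos h]
      have hd2 : PySem.Int.floordiv m 2 = m / 2 :=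
        PySem.Int.floordiv_eq_ediv_of_pos (by omega)
      have hrec := ih (PySem.Int.floordiv m 2) (r * 2) (by rw [hd2]; omega)
        (by rw [hd2]; omega)
      rw [hrec]
      have hp : (0:Int) < PySem.Int.floordiv m 1025 := by
        rw [PySem.Int.floordiv_eq_ediv_of_pos (by omega : (0:Int) < 1025)]; omega
      have hcomm : PySem.Int.floordiv (PySem.Int.floordiv m 2) 1025
          = PySem.Int.floordiv (PySem.Int.floordiv m 1025) 2 := by
        simp only [PySem.Int.floordiv_eq_ediv_of_pos (show (0:Int) < 2 by omega),
          PySem.Int.floordiv_eq_ediv_of_pos (show (0:Int) < 1025 by omega)]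
        omega
      rw [hcomm, PySem.Int.bitLength_of_pos hp, pow_succ]
      ring
    · rw [if_neg h]
      have hz : PySem.Int.floordiv m 1025 = 0 := by
        rw [PySem.Int.floordiv_eq_ediv_of_pos (by omega : (0:Int) < 1025)]; omega
      rw [hz]
      simp

-- A's nested cascade and B's threshold pass agree on 2 * 2^n (n ≤ 21 suffices on Dom)
theorem pv_cascade_fold (n : Nat) (hn : n ≤ 21) :
    pyCascade (2 * 2 ^ n) =
      List.foldl (fun r limit => if limit < r then PySem.Int.floordiv r 2 else r)
        (2 * 2 ^ n) [(8:Int), 16, 32, 64] := by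
  interval_cases n <;> decide

-- ===== VERDICT (by name: the statement is the Claim_ definition above) =====

theorem get_remove_values_py_spec : Claim_equal_get_remove_values_py := by
  unfold Claim_equal_get_remove_values_py
  intro m hdom
  unfold Dom_get_remove_values_py pvDomInt at hdom
  have hb : -2147483648 ≤ m ∧ m ≤ 2147483648 := by
    simpa using hdom
  unfold Spec_get_remove_values_py get_remove_values_py get_remove_values_py_alt
  by_cases h : m < 1024
  · simp [h]
  · rw [if_neg h, if_neg h]
    set n := PySem.Int.bitLength (PySem.Int.floordiv m 1025) with hn
    have hloop := pv_loop_snd m.toNat m 2 (by omega) (le_refl _)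
    rw [← hn] at hloop
    have hd : PySem.Int.floordiv m 1025 = m / 1025 :=
      PySem.Int.floordiv_eq_ediv_of_pos (by omega)
    have hn21 : n ≤ 21 := by
      apply pv_bitLength_le 21
      · rw [hd]; omega
      · rw [hd]; omega
    rw [hloop]
    simpa using pv_cascade_fold n hn21
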